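-- pv_equiv track=rewrite | github.com/Nandana1510/Business-Analyst | backend/api_pipeline_session.py | _validate_gap_selection
-- ===== SOURCE A (Python) =====
-- from collections import Counter
--
-- def _validate_gap_selection(selected: list[str], allowed: list[str]) -> list[str] | None:
--     """Return ordered validated lines, or None if any selection is not in the multiset ``allowed``."""
--     pool = Counter(allowed)
--     out: list[str] = []
--     for raw in selected:
--         s = (raw or "").strip()
--         if not s:
--             continue
--         if pool[s] <= 0:
--             return None
--         pool[s] -= 1
--         out.append(s)
--     return out if out else None
-- ===== SOURCE B (Python) =====
-- from collections import Counter
--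
-- def _validate_gap_selection(selected: list[str], allowed: list[str]) -> list[str] | None:
--     """Return ordered validated lines, or None if any selection is not in the multiset ``allowed``."""
--     cleaned = [s for raw in selected if (s := (raw or "").strip())]
--     if not cleaned:
--         return None
--     need = Counter(cleaned)
--     pool = Counter(allowed)
--     if any(need[k] > pool[k] for k in need):
--         return None
--     return cleaned
-- ===== Notes on version B (the rewrite author's own statement) =====
-- stated objective: simpler
-- what changed: Replaces the single decrementing scan (mutating the pool Counter and bailing out mid-loop) with three separate passes: clean in one comprehension, check emptiness, then validate by a per-key multiset comparison need[k] <= pool[k].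
import Mathlib
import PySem

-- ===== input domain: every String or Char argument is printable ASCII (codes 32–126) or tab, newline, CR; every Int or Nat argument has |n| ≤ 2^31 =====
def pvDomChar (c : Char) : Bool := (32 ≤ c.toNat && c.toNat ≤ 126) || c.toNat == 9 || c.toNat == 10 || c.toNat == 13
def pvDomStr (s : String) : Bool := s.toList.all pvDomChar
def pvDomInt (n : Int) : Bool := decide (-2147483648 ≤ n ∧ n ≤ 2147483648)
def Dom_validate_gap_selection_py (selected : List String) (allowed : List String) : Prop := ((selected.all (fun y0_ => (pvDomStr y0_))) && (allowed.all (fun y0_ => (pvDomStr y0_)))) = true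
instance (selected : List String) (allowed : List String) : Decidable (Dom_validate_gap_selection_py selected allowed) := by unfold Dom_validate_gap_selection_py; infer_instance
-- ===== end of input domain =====

-- B replaces A's single decrementing scan with separate clean / empty-check / per-key multiset-comparison passes (same result, alternative decomposition).
-- ===== PORT A =====
-- loop of A: decrement the pool Counter while scanning, bail out on a missing key
def vgsLoopA : List String → PySem.Dict String Int → List String → Option (List String)
  | [], _, out => if out.isEmpty then none else some out
  | raw :: rest, pool, out =>
    let s := PySem.Str.strip (if raw = "" then "" else raw)
    if s = "" then vgsLoopA rest pool out
    else if pool.getD s 0 ≤ 0 then none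
    else vgsLoopA rest (pool.insert s (pool.getD s 0 - 1)) (out ++ [s])

def validate_gap_selection_py (selected : List String) (allowed : List String) : Option (List String) :=
  vgsLoopA selected (PySem.Dict.counter allowed) []

-- ===== PORT B =====
def validate_gap_selection_py_alt (selected : List String) (allowed : List String) : Option (List String) :=
  let cleaned := selected.filterMap (fun raw =>
    let s := PySem.Str.strip raw
    if s = "" then none else some s)
  if cleaned = [] then none
  else
    let need := PySem.Dict.counter cleaned
    let pool := PySem.Dict.counter allowed
    if (PySem.Dict.keys need).any (fun k => pool.getD k 0 < need.getD k 0) then none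
    else some cleaned

-- ===== PRECONDITION & SPEC =====
def Spec_validate_gap_selection_py (selected : List String) (allowed : List String) (out : Option (List String)) : Prop := out = validate_gap_selection_py_alt selected allowed
instance (selected : List String) (allowed : List String) (out : Option (List String)) : Decidable (Spec_validate_gap_selection_py selected allowed out) := by unfold Spec_validate_gap_selection_py; infer_instance

-- ===== CLAIM (what is proved, stated in full; the proofs are below) =====
def Claim_equal_validate_gap_selection_py : Prop := ∀ (selected : List String) (allowed : List String), Dom_validate_gap_selection_py selected allowed → Spec_validate_gap_selection_py selected allowed (validate_gap_selection_py selected allowed)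

-- ===== LEMMAS AND PROOFS =====
-- clean one raw line (B's comprehension step)
def vgsClean (l : List String) : List String :=
  l.filterMap (fun raw =>
    let s := PySem.Str.strip raw
    if s = "" then none else some s)

theorem vgs_or_empty (raw : String) : (if raw = "" then "" else raw) = raw := by
  split <;> simp_all

theorem vgs_count_cons_self (s : String) (cr : List String) :
    (s :: cr).count s = cr.count s + 1 := by
  simp [List.count_cons]

theorem vgs_count_cons_ne (s k : String) (cr : List String) (h : k ≠ s) :
    (s :: cr).count k = cr.count k := by
  simp [Ne.symm h]

theorem vgs_cond_iff (s : String) (cr : List String) (pool : PySem.Dict String Int)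
    (hpos : 0 < pool.getD s 0) :
    (∀ k ∈ cr, (cr.count k : Int) ≤ (pool.insert s (pool.getD s 0 - 1)).getD k 0) ↔
    (∀ k ∈ s :: cr, ((s :: cr).count k : Int) ≤ pool.getD k 0) := by
  constructor
  · intro h k hk
    by_cases hks : k = s
    · subst hks
      rw [vgs_count_cons_self]
      by_cases hmem : k ∈ cr
      · have h2 := h k hmem
        rw [PySem.Dict.getD_insert_self] at h2
        push_cast
        omega
      · have h0 : cr.count k = 0 := List.count_eq_zero.mpr hmem
        rw [h0]
        omega
    · have hk' : k ∈ cr := by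
        rcases List.mem_cons.mp hk with h1 | h1
        · exact absurd h1 hks
        · exact h1
      have h2 := h k hk'
      rw [PySem.Dict.getD_insert_of_ne pool _ _ hks] at h2
      rw [vgs_count_cons_ne s k cr hks]
      exact h2
  · intro h k hk
    by_cases hks : k = s
    · subst hks
      have h2 := h k List.mem_cons_self
      rw [vgs_count_cons_self] at h2
      rw [PySem.Dict.getD_insert_self]
      push_cast at h2
      omega
    · have h2 := h k (List.mem_cons_of_mem _ hk)
      rw [vgs_count_cons_ne s k cr hks] at h2
      rw [PySem.Dict.getD_insert_of_ne pool _ _ hks]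
      exact h2

theorem vgsLoopA_spec (l : List String) (pool : PySem.Dict String Int) (out : List String) :
    vgsLoopA l pool out =
      if ∀ k ∈ vgsClean l, ((vgsClean l).count k : Int) ≤ pool.getD k 0 then
        (if (out ++ vgsClean l).isEmpty then none else some (out ++ vgsClean l))
      else none := by
  induction l generalizing pool out with
  | nil => simp [vgsLoopA, vgsClean]
  | cons raw rest ih =>
    rw [vgsLoopA, vgs_or_empty]
    by_cases hs : PySem.Str.strip raw = ""
    · have hc : vgsClean (raw :: rest) = vgsClean rest := by
        simp [vgsClean, hs]
      rw [hc]
      simp only [hs, if_true]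
      exact ih pool out
    · have hc : vgsClean (raw :: rest) = PySem.Str.strip raw :: vgsClean rest := by
        simp [vgsClean, hs]
      rw [hc]
      set s := PySem.Str.strip raw with hsdef
      by_cases hp : pool.getD s 0 ≤ 0
      · have hnot : ¬ ∀ k ∈ s :: vgsClean rest, ((s :: vgsClean rest).count k : Int) ≤ pool.getD k 0 := by
          intro hall
          have := hall s List.mem_cons_self
          have hpos : 0 < (s :: vgsClean rest).count s :=
            List.count_pos_iff.mpr List.mem_cons_self
          omega
        simp only [hs, hp, if_true, if_false]
        rw [if_neg hnot]
      · have hpos : 0 < pool.getD s 0 := by omega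
        simp only [hs, hp, if_false]
        rw [ih,
          if_congr (vgs_cond_iff s (vgsClean rest) pool hpos) rfl rfl]
        split
        · simp
        · rfl

theorem validate_gap_selection_py_spec : Claim_equal_validate_gap_selection_py := by
  intro selected allowed _
  unfold Spec_validate_gap_selection_py
  rw [validate_gap_selection_py, vgsLoopA_spec, validate_gap_selection_py_alt]
  simp only [vgsClean]
  set c := selected.filterMap (fun raw =>
    let s := PySem.Str.strip raw
    if s = "" then none else some s) with hc
  by_cases hnil : c = []
  · simp [hnil]
  · rw [if_neg hnil]
    have hany : ((PySem.Dict.counter c).keys.any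
        (fun k => (PySem.Dict.counter allowed).getD k 0 < (PySem.Dict.counter c).getD k 0)) = true ↔
        ¬ ∀ k ∈ c, (c.count k : Int) ≤ (PySem.Dict.counter allowed).getD k 0 := by
      rw [PySem.Dict.keys_counter]
      simp only [List.any_eq_true, PySem.Set.mem_ofList, PySem.Dict.getD_counter]
      push_neg
      constructor
      · rintro ⟨k, hk, h⟩
        exact ⟨k, hk, by simpa using h⟩
      · rintro ⟨k, hk, h⟩
        exact ⟨k, hk, by simpa using h⟩
    by_cases hcond : ∀ k ∈ c, (c.count k : Int) ≤ (PySem.Dict.counter allowed).getD k 0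
    · rw [if_pos hcond, if_neg (fun h => (hany.mp h) hcond)]
      simp [hnil]
    · rw [if_neg hcond, if_pos (hany.mpr hcond)]
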